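-- pv_equiv track=rewrite | github.com/santoshvandari/GfG-60-Days-of-Problem-Solving | Day45/main.py | intersectionWithDuplicates
-- ===== SOURCE A (Python) =====
-- def intersectionWithDuplicates(a, b):
--     # code here
--     unique = set(a)
--     result = []
--     for el in b:
--         if el in unique:
--             result.append(el)
--             unique.remove(el)
--     return result
-- ===== SOURCE B (Python) =====
-- def intersectionWithDuplicates(a, b):
--     first = {}
--     for i, x in enumerate(b):
--         if x not in first:
--             first[x] = i
--     common = set(b) & set(a)
--     return sorted(common, key=lambda x: first[x])
-- ===== Notes on version B (the rewrite author's own statement) =====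
-- stated objective: alternative
-- what changed: Instead of A's single pass over b that filters and mutates the membership set, B computes the set intersection set(b) & set(a) and sorts it by each element's first-occurrence index in b (precomputed in one enumerate pass); the result is produced by a sort, not by a filtering scan.
import Mathlib
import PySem

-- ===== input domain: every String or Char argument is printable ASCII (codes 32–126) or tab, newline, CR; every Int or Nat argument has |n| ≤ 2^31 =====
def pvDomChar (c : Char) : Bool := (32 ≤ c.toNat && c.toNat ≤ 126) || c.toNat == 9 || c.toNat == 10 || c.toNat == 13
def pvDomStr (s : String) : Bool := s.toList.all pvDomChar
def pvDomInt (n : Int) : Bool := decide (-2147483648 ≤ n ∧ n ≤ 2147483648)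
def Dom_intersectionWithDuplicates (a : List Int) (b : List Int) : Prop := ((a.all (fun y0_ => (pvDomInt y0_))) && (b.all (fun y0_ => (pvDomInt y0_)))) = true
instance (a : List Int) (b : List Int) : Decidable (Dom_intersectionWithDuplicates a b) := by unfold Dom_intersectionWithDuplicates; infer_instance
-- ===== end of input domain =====

-- B replaces A's filtering pass over b (which mutates the membership set) by an entirely
-- different construction: it takes the set intersection set(b) & set(a) and SORTS it by each
-- element's first-occurrence index in b (precomputed in one enumerate pass); same result, similar cost.

-- ===== PORT A =====
-- loop body: 'if el in unique: result.append(el); unique.remove(el)'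
def iwdStep (st : PySem.Set Int × List Int) (el : Int) : PySem.Set Int × List Int :=
  if PySem.Set.contains st.1 el then
    ((PySem.Set.remove? st.1 el).getD st.1, st.2 ++ [el])
  else st

def intersectionWithDuplicates (a : List Int) (b : List Int) : List Int :=
  (b.foldl iwdStep (PySem.Set.ofList a, [])).2

-- ===== PORT B =====
-- loop body: 'if x not in first: first[x] = i'
def iwdFirstStep (d : PySem.Dict Int Int) (p : Int × Int) : PySem.Dict Int Int :=
  if d.contains p.2 then d else d.insert p.2 p.1

def intersectionWithDuplicates_alt (a : List Int) (b : List Int) : List Int :=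
  let first := (PySem.List.enumerate b).foldl iwdFirstStep PySem.Dict.empty
  let common := PySem.Set.inter (PySem.Set.ofList b) (PySem.Set.ofList a)
  -- 'first[x]': every element of common is in b, so the key is always present; getD's
  -- default 0 is never used and the port is exact.
  PySem.List.sorted common (fun x => first.getD x 0)

-- ===== PRECONDITION & SPEC =====
def Spec_intersectionWithDuplicates (a : List Int) (b : List Int) (out : List Int) : Prop := out = intersectionWithDuplicates_alt a b
instance (a : List Int) (b : List Int) (out : List Int) : Decidable (Spec_intersectionWithDuplicates a b out) := by unfold Spec_intersectionWithDuplicates; infer_instance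

-- ===== CLAIM (what is proved, stated in full; the proofs are below) =====
def Claim_equal_intersectionWithDuplicates : Prop := ∀ (a : List Int) (b : List Int), Dom_intersectionWithDuplicates a b → Spec_intersectionWithDuplicates a b (intersectionWithDuplicates a b)

-- ===== LEMMAS AND PROOFS =====

lemma filter_discard (s l : List Int) (x : Int) :
    l.filter (fun y => decide (y ∈ s) && !decide (y = x))
      = (PySem.Set.discard l x).filter (fun y => decide (y ∈ s)) := by
  simp only [PySem.Set.discard, List.filter_filter]
  refine List.filter_congr (fun y _ => ?_)
  by_cases h : y = x <;> simp [h, Bool.and_comm]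

lemma filter_discard_of_not_mem (s l : List Int) (x : Int) (hx : x ∉ s) :
    (PySem.Set.discard l x).filter (fun y => decide (y ∈ s))
      = l.filter (fun y => decide (y ∈ s)) := by
  simp only [PySem.Set.discard, List.filter_filter]
  refine List.filter_congr (fun y _ => ?_)
  by_cases h : y = x
  · subst h; simp [hx]
  · simp [h]

-- A's loop produces the first occurrences (in b's order) of the elements of set(a).
lemma iwd_loop (b : List Int) : ∀ (s : PySem.Set Int) (r : List Int),
    (b.foldl iwdStep (s, r)).2
      = r ++ (PySem.Set.ofList b).filter (fun x => PySem.Set.contains s x) := by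
  induction b with
  | nil => intro s r; simp [PySem.Set.ofList_nil]
  | cons x xs ih =>
    intro s r
    simp only [List.foldl_cons, PySem.Set.ofList_cons]
    by_cases hx : x ∈ s
    · have hstep : iwdStep (s, r) x = (PySem.Set.discard s x, r ++ [x]) := by
        simp [iwdStep, PySem.Set.contains, PySem.Set.remove?, hx]
      rw [hstep, ih]
      simp [PySem.Set.contains, hx, filter_discard s (PySem.Set.ofList xs) x]
    · have hstep : iwdStep (s, r) x = (s, r) := by
        simp [iwdStep, PySem.Set.contains, hx]
      rw [hstep, ih]
      simp [PySem.Set.contains, hx,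
        filter_discard_of_not_mem s (PySem.Set.ofList xs) x hx]

-- B's dict loop never touches a key already present.
lemma fd_preserve (l : List (Int × Int)) : ∀ (d : PySem.Dict Int Int) (x : Int),
    d.contains x = true →
    (l.foldl iwdFirstStep d).getD x 0 = d.getD x 0 ∧
      (l.foldl iwdFirstStep d).contains x = true := by
  induction l with
  | nil => intro d x h; exact ⟨rfl, h⟩
  | cons p t ih =>
    intro d x h
    rw [List.foldl_cons]
    by_cases hc : d.contains p.2 = true
    · rw [show iwdFirstStep d p = d from by simp [iwdFirstStep, hc]]
      exact ih d x h
    · rw [show iwdFirstStep d p = d.insert p.2 p.1 from by simp [iwdFirstStep, hc]]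
      have hne : x ≠ p.2 := by rintro rfl; exact hc h
      have h' : (d.insert p.2 p.1).contains x = true := by
        simp [PySem.Dict.contains_insert, h]
      have := ih (d.insert p.2 p.1) x h'
      rw [this.1]
      exact ⟨by simp [PySem.Dict.getD_insert, hne], this.2⟩

-- B's dict loop records the first-occurrence index of every element of b.
lemma fd_lookup (b : List Int) : ∀ (s : Int) (d : PySem.Dict Int Int) (x : Int),
    x ∈ b → d.contains x = false →
    ((PySem.List.enumerate b s).foldl iwdFirstStep d).getD x 0 = s + (b.idxOf x : Int) := by
  induction b with
  | nil => intro s d x hx; exact absurd hx (List.not_mem_nil)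
  | cons y ys ih =>
    intro s d x hx hc
    rw [PySem.List.enumerate_cons, List.foldl_cons]
    by_cases hxy : x = y
    · subst hxy
      rw [show iwdFirstStep d (s, x) = d.insert x s from by simp [iwdFirstStep, hc]]
      have h' : (d.insert x s).contains x = true := PySem.Dict.contains_insert_self d x s
      have := fd_preserve (PySem.List.enumerate ys (s + 1)) (d.insert x s) x h'
      rw [this.1, PySem.Dict.getD_insert_self, List.idxOf_cons_self]
      simp
    · by_cases hcy : d.contains y = true
      · rw [show iwdFirstStep d (s, y) = d from by simp [iwdFirstStep, hcy]]
        have hxys : x ∈ ys := by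
          rcases List.mem_cons.1 hx with h | h
          · exact absurd h hxy
          · exact h
        rw [ih (s + 1) d x hxys hc, List.idxOf_cons_ne ys (fun h => hxy h.symm)]
        push_cast; ring
      · rw [show iwdFirstStep d (s, y) = d.insert y s from by simp [iwdFirstStep, hcy]]
        have hxys : x ∈ ys := by
          rcases List.mem_cons.1 hx with h | h
          · exact absurd h hxy
          · exact h
        have hc' : (d.insert y s).contains x = false := by
          simp [PySem.Dict.contains_insert, hc, hxy]
        rw [ih (s + 1) (d.insert y s) x hxys hc',
          List.idxOf_cons_ne ys (fun h => hxy h.symm)]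
        push_cast; ring

-- set(b) lists b's distinct elements in strictly increasing first-occurrence order.
lemma ofList_pairwise_idxOf (b : List Int) :
    (PySem.Set.ofList b).Pairwise (fun u v => b.idxOf u < b.idxOf v) := by
  induction b with
  | nil => simp [PySem.Set.ofList_nil]
  | cons x xs ih =>
    rw [PySem.Set.ofList_cons]
    refine List.Pairwise.cons ?_ ?_
    · intro y hy
      have hyne : y ≠ x := by
        have := List.of_mem_filter hy
        simpa using this
      rw [List.idxOf_cons_self, List.idxOf_cons_ne xs hyne.symm]
      exact Nat.succ_pos _
    · have hsub : (PySem.Set.discard (PySem.Set.ofList xs) x).Sublist (PySem.Set.ofList xs) :=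
        List.filter_sublist
      have hpw := ih.sublist hsub
      refine hpw.imp_of_mem ?_
      intro u v hu hv huv
      have hune : u ≠ x := by simpa using List.of_mem_filter hu
      have hvne : v ≠ x := by simpa using List.of_mem_filter hv
      rw [List.idxOf_cons_ne xs hune.symm, List.idxOf_cons_ne xs hvne.symm]
      exact Nat.succ_lt_succ huv

-- ===== VERDICT (by name: the statement is the Claim_ definition above) =====
theorem intersectionWithDuplicates_spec : Claim_equal_intersectionWithDuplicates := by
  intro a b _
  unfold Spec_intersectionWithDuplicates intersectionWithDuplicates intersectionWithDuplicates_alt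
  have hA : (b.foldl iwdStep (PySem.Set.ofList a, [])).2
      = (PySem.Set.ofList b).filter (fun x => PySem.Set.contains (PySem.Set.ofList a) x) := by
    simpa using iwd_loop b (PySem.Set.ofList a) []
  set first := (PySem.List.enumerate b).foldl iwdFirstStep PySem.Dict.empty with hfirst
  set common := PySem.Set.inter (PySem.Set.ofList b) (PySem.Set.ofList a) with hcommon
  have hkey : ∀ x ∈ common, first.getD x 0 = (b.idxOf x : Int) := by
    intro x hxc
    have hxb : x ∈ b := by
      have : x ∈ PySem.Set.ofList b := List.mem_of_mem_filter hxc
      exact (PySem.Set.mem_ofList b x).1 this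
    have := fd_lookup b 0 PySem.Dict.empty x hxb (PySem.Dict.contains_empty x)
    simpa using this
  have hpw : common.Pairwise (fun u v => (fun x => first.getD x 0) u < (fun x => first.getD x 0) v) := by
    have hsub : common.Sublist (PySem.Set.ofList b) := List.filter_sublist
    have := (ofList_pairwise_idxOf b).sublist hsub
    refine this.imp_of_mem ?_
    intro u v hu hv huv
    simp only [hkey u hu, hkey v hv]
    exact_mod_cast huv
  have hsorted : PySem.List.sorted common (fun x => first.getD x 0) = common :=
    PySem.List.sorted_eq_of_perm_of_pairwise_lt common common _ (List.Perm.refl _) hpw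
  rw [hA, hsorted, hcommon]
  rfl
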